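-- pv_equiv track=rewrite | github.com/hjamet/dvc-viewer | dvc_viewer/hasher.py | find_import_chain
-- ===== SOURCE A (Python) =====
-- def find_import_chain(import_graph: dict[str, list[str]], target_file: str, entry_point: str) -> list[str] | None:
--     """Find the import chain from target_file to entry_point using BFS."""
--     if target_file == entry_point:
--         return [entry_point]
--
--     # BFS to find path from entry_point to target_file
--     queue = [[entry_point]]
--     visited = {entry_point}
--
--     while queue:
--         path = queue.pop(0)
--         node = path[-1]
--
--         if node == target_file:
--             # We want modified_file -> ... -> entry_point
--             return list(reversed(path))
--
--         for neighbor in import_graph.get(node, []):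
--             if neighbor not in visited:
--                 visited.add(neighbor)
--                 new_path = list(path)
--                 new_path.append(neighbor)
--                 queue.append(new_path)
--
--     return None
-- ===== SOURCE B (Python) =====
-- def find_import_chain(import_graph: dict[str, list[str]], target_file: str, entry_point: str) -> list[str] | None:
--     """Find the import chain from target_file to entry_point: level-by-level BFS
--     over shared cons-cell chains (no path copying, no pop(0))."""
--     seen = {entry_point}
--     frontier = [(entry_point, None)]
--     while frontier:
--         next_frontier = []
--         for cell in frontier:
--             node = cell[0]
--             if node == target_file:
--                 chain = []
--                 while cell is not None:
--                     chain.append(cell[0])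
--                     cell = cell[1]
--                 return chain
--             for nb in import_graph.get(node, []):
--                 if nb not in seen:
--                     seen.add(nb)
--                     next_frontier.append((nb, cell))
--         frontier = next_frontier
--     return None
-- ===== Notes on version B (the rewrite author's own statement) =====
-- stated objective: alternative
-- what changed: Replaces the pop(0) queue of fully-copied paths with level-by-level BFS over shared cons-cell (node, parent) chains, reconstructing the output by unwinding the chain; drops the target==entry special case (the first dequeue handles it).
import Mathlib
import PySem

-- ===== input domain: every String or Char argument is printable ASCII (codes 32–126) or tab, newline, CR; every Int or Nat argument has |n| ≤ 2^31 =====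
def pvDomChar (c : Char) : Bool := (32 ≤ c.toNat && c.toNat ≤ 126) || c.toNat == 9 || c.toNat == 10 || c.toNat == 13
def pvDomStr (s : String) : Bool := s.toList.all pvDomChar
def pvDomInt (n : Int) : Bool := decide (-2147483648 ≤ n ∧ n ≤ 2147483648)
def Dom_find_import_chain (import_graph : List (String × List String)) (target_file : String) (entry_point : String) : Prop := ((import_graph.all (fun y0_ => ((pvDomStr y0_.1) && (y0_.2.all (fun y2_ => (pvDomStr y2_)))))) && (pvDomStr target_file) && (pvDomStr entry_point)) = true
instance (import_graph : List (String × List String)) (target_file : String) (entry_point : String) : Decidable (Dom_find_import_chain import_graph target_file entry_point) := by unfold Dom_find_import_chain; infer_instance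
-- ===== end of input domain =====

-- B replaces A's pop(0) queue of fully copied paths by level-by-level BFS over shared
-- cons-cell (node, parent) chains (alternative algorithm, same results; no mutation).

-- ===== PORT A =====

-- import_graph.get(node, []): first-match lookup in the association list (dict convention)
def graphGet (g : List (String × List String)) (k : String) : List String :=
  match g.find? (fun p => p.1 == k) with
  | some p => p.2
  | none => []

-- upper bound on the number of loop iterations (each pop is of a node enqueued at most once);
-- pure totality fuel, never reached
def chainFuel (g : List (String × List String)) : Nat :=
  (g.map (fun p => p.2.length)).sum + 2

-- body of A's 'for neighbor in …' loop, state = (visited, queue)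
def stepA (path : List String) (st : PySem.Set String × List (List String)) (nb : String) :
    PySem.Set String × List (List String) :=
  if PySem.Set.contains st.1 nb then st
  else (PySem.Set.add st.1 nb, st.2 ++ [path ++ [nb]])

-- A's while loop: queue of paths, pop(0), path[-1], append path+[neighbor]
def loopA (g : List (String × List String)) (target : String) :
    Nat → List (List String) → PySem.Set String → Option (List String)
  | 0, _, _ => none
  | fuel+1, queue, visited =>
    match queue with
    | [] => none
    | path :: rest =>
      match PySem.List.pyGet? path (-1) with
      | none => none  -- IndexError; unreachable: queued paths are nonempty
      | some node =>
        if node == target then some path.reverse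
        else
          let st := (graphGet g node).foldl (stepA path) (visited, rest)
          loopA g target fuel st.2 st.1

def find_import_chain (import_graph : List (String × List String)) (target_file : String) (entry_point : String) : Option (List String) :=
  if target_file == entry_point then some [entry_point]
  else loopA import_graph target_file (chainFuel import_graph)
        [[entry_point]] (PySem.Set.ofList [entry_point])

-- ===== PORT B =====

-- Python B's linked cells: (node, prev) tuples terminated by None
inductive PvCell where
  | nil : PvCell
  | cons : String → PvCell → PvCell
deriving DecidableEq, Repr

-- B's inner 'while cell is not None' unwinding loop
def pvUnwind : PvCell → List String
  | .nil => []
  | .cons n p => n :: pvUnwind p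

-- body of B's 'for nb in …' loop, state = (seen, next_frontier)
def stepB (c : PvCell) (st : PySem.Set String × List PvCell) (nb : String) :
    PySem.Set String × List PvCell :=
  if PySem.Set.contains st.1 nb then st
  else (PySem.Set.add st.1 nb, st.2 ++ [PvCell.cons nb c])

-- B's outer while loop ('frontier = next_frontier' is the first branch) fused with the
-- 'for cell in frontier' loop (one fuel tick per cell; same totality fuel as A)
def loopB (g : List (String × List String)) (target : String) :
    Nat → List PvCell → List PvCell → PySem.Set String → Option (List String)
  | fuel, [], nxt, seen =>
    match nxt with
    | [] => none
    | c :: rest => loopB g target fuel (c :: rest) [] seen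
  | 0, _ :: _, _, _ => none
  | fuel+1, c :: rest, nxt, seen =>
    match c with
    | .nil => none  -- unreachable: queued cells are nonempty
    | .cons node _ =>
      if node == target then some (pvUnwind c)
      else
        let st := (graphGet g node).foldl (stepB c) (seen, nxt)
        loopB g target fuel rest st.2 st.1
termination_by fuel frontier nxt _ => (fuel, nxt.length)
decreasing_by
  · exact Prod.Lex.right _ (by simp)
  · exact Prod.Lex.left _ _ (by omega)

def find_import_chain_alt (import_graph : List (String × List String)) (target_file : String) (entry_point : String) : Option (List String) :=
  loopB import_graph target_file (chainFuel import_graph)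
    [PvCell.cons entry_point PvCell.nil] [] (PySem.Set.ofList [entry_point])

-- ===== PRECONDITION & SPEC =====
def Spec_find_import_chain (import_graph : List (String × List String)) (target_file : String) (entry_point : String) (out : Option (List String)) : Prop := out = find_import_chain_alt import_graph target_file entry_point
instance (import_graph : List (String × List String)) (target_file : String) (entry_point : String) (out : Option (List String)) : Decidable (Spec_find_import_chain import_graph target_file entry_point out) := by unfold Spec_find_import_chain; infer_instance

-- ===== CLAIM (what is proved, stated in full; the proofs are below) =====
def Claim_equal_find_import_chain : Prop := ∀ (import_graph : List (String × List String)) (target_file : String) (entry_point : String), Dom_find_import_chain import_graph target_file entry_point → Spec_find_import_chain import_graph target_file entry_point (find_import_chain import_graph target_file entry_point)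

-- ===== LEMMAS AND PROOFS =====

-- correspondence between a B cell and an A path: the cell is the reversed path
def PvRel (c : PvCell) (p : List String) : Prop := pvUnwind c = p.reverse ∧ c ≠ PvCell.nil

theorem pv_fold_fst (p : List String) (c : PvCell) :
    ∀ (ns : List String) (s : PySem.Set String) (qA : List (List String)) (qB : List PvCell),
      (ns.foldl (stepA p) (s, qA)).1 = (ns.foldl (stepB c) (s, qB)).1 := by
  intro ns
  induction ns with
  | nil => intro s qA qB; rfl
  | cons nb ns ih =>
    intro s qA qB
    by_cases h : nb ∈ s
    · simp only [List.foldl_cons, stepA, stepB]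
      simp [h]
      exact ih _ _ _
    · simp only [List.foldl_cons, stepA, stepB]
      simp [h]
      exact ih _ _ _

theorem pv_fold_shiftA (p : List String) :
    ∀ (ns : List String) (s : PySem.Set String) (q1 q2 : List (List String)),
      (ns.foldl (stepA p) (s, q1 ++ q2)).2 = q1 ++ (ns.foldl (stepA p) (s, q2)).2 := by
  intro ns
  induction ns with
  | nil => intro s q1 q2; rfl
  | cons nb ns ih =>
    intro s q1 q2
    by_cases h : nb ∈ s
    · simp only [List.foldl_cons, stepA]
      simp [h]
      exact ih _ _ _
    · simp only [List.foldl_cons, stepA]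
      simp [h]
      simpa [List.append_assoc] using ih (s ++ [nb]) q1 (q2 ++ [p ++ [nb]])

theorem pv_fold_rel (p : List String) (c : PvCell) (hcp : PvRel c p) :
    ∀ (ns : List String) (s : PySem.Set String) (qA : List (List String)) (qB : List PvCell),
      List.Forall₂ PvRel qB qA →
      List.Forall₂ PvRel (ns.foldl (stepB c) (s, qB)).2 (ns.foldl (stepA p) (s, qA)).2 := by
  intro ns
  induction ns with
  | nil => intro s qA qB h; exact h
  | cons nb ns ih =>
    intro s qA qB h
    by_cases hmem : nb ∈ s
    · simp only [List.foldl_cons, stepA, stepB]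
      simp [hmem]
      exact ih _ _ _ h
    · simp only [List.foldl_cons, stepA, stepB]
      simp [hmem]
      refine ih _ _ _ (List.rel_append h ?_)
      refine List.Forall₂.cons ?_ List.Forall₂.nil
      exact ⟨by simp [pvUnwind, hcp.1], by simp⟩

theorem pv_loop_eq (g : List (String × List String)) (target : String) :
    ∀ (fuel : Nat) (frontier : List PvCell) (fA : List (List String))
      (nxt : List PvCell) (nA : List (List String)) (seen : PySem.Set String),
      List.Forall₂ PvRel frontier fA → List.Forall₂ PvRel nxt nA →
      loopA g target fuel (fA ++ nA) seen = loopB g target fuel frontier nxt seen := by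
  intro fuel
  induction fuel with
  | zero =>
    intro frontier fA nxt nA seen hf hn
    cases frontier with
    | cons c rest => simp [loopA, loopB]
    | nil =>
      cases nxt with
      | nil => simp [loopA, loopB]
      | cons c rest => simp [loopA, loopB]
  | succ f ih =>
    -- one dequeue step, usable both directly and after B's frontier swap
    have key : ∀ (c : PvCell) (rest : List PvCell) (p : List String) (restA : List (List String))
        (nxt : List PvCell) (nA : List (List String)) (seen : PySem.Set String),
        PvRel c p → List.Forall₂ PvRel rest restA → List.Forall₂ PvRel nxt nA →
        loopA g target (f+1) ((p :: restA) ++ nA) seen = loopB g target (f+1) (c :: rest) nxt seen := by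
      intro c rest p restA nxt nA seen hcp hrest hnxt
      obtain ⟨hun, hne⟩ := hcp
      cases c with
      | nil => exact absurd rfl hne
      | cons node prev =>
        have hlast : p.getLast? = some node := by
          rw [← List.head?_reverse, ← hun]
          rfl
        rw [List.cons_append, loopA, loopB]
        rw [PySem.List.pyGet?_neg_one, hlast]
        simp only []
        by_cases htgt : node == target
        · simp [htgt, hun]
        · simp only [htgt, Bool.false_eq_true, if_false]
          have hfst := pv_fold_fst p (PvCell.cons node prev) (graphGet g node) seen (restA ++ nA) nxt
          have hshift := pv_fold_shiftA p (graphGet g node) seen restA nA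
          have hrel := pv_fold_rel p (PvCell.cons node prev) ⟨hun, by simp⟩ (graphGet g node) seen nA nxt hnxt
          rw [hshift, hfst]
          exact ih rest restA _ _ _ hrest hrel
    intro frontier fA nxt nA seen hf hn
    cases hf with
    | cons hcp hrest =>
      exact key _ _ _ _ _ _ _ hcp hrest hn
    | nil =>
      cases hn with
      | nil => simp [loopA, loopB]
      | @cons c p rest restA hcp hrest =>
        have h1 : loopA g target (f+1) ((p :: restA) ++ []) seen
            = loopB g target (f+1) (c :: rest) [] seen :=
          key _ _ _ _ _ _ _ hcp hrest List.Forall₂.nil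
        simpa [loopB] using h1

-- ===== VERDICT (by name: the statement is the Claim_ definition above) =====
theorem find_import_chain_spec : Claim_equal_find_import_chain := by
  intro g t e _
  unfold Spec_find_import_chain find_import_chain find_import_chain_alt
  by_cases h : t = e
  · subst h
    obtain ⟨k, hk⟩ : ∃ k, chainFuel g = k + 1 := ⟨(g.map (fun p => p.2.length)).sum + 1, rfl⟩
    rw [hk, loopB]
    simp [pvUnwind]
  · have hne : (t == e) = false := by simp [h]
    rw [hne]
    simp only [Bool.false_eq_true, if_false]
    have hrel : List.Forall₂ PvRel [PvCell.cons e PvCell.nil] [[e]] := by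
      refine List.Forall₂.cons ?_ List.Forall₂.nil
      exact ⟨by simp [pvUnwind], by simp⟩
    have := pv_loop_eq g t (chainFuel g) [PvCell.cons e PvCell.nil] [[e]] [] []
      (PySem.Set.ofList [e]) hrel List.Forall₂.nil
    simpa using this
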